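-- pv_equiv track=rewrite | github.com/zacharyhorvitz/ParaGuide | evaluation/automatic_evals/combine_results.py | choose_meaningful_hparams
-- ===== SOURCE A (Python) =====
-- def choose_meaningful_hparams(hparam_lists):
--     all_keys = set()
--     for hparams in hparam_lists:
--         all_keys.update(hparams.keys())
--
--     keys_to_values = {k: [] for k in all_keys}
--     for hparams in hparam_lists:
--         for k, v in hparams.items():
--             assert k in keys_to_values
--             if v not in keys_to_values[k]:
--                 keys_to_values[k].append(v)
--
--     meaningful_hparams = []
--     for k, v in keys_to_values.items():
--         if len(v) > 1:
--             meaningful_hparams.append(k)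
--
--     return meaningful_hparams
-- ===== SOURCE B (Python) =====
-- def choose_meaningful_hparams(hparam_lists):
--     all_keys = set()
--     for hparams in hparam_lists:
--         all_keys.update(hparams.keys())
--
--     meaningful_hparams = []
--     for k in all_keys:
--         seen = []
--         for hparams in hparam_lists:
--             if k in hparams and hparams[k] not in seen:
--                 seen.append(hparams[k])
--         if len(seen) > 1:
--             meaningful_hparams.append(k)
--     return meaningful_hparams
-- ===== Notes on version B (the rewrite author's own statement) =====
-- stated objective: alternative
-- what changed: Inverts the loop nesting: instead of grouping all items into a keys_to_values dict in one pass, B iterates over the key set and rescans hparam_lists per key, accumulating that key's distinct values into a fresh list.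
import Mathlib
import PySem

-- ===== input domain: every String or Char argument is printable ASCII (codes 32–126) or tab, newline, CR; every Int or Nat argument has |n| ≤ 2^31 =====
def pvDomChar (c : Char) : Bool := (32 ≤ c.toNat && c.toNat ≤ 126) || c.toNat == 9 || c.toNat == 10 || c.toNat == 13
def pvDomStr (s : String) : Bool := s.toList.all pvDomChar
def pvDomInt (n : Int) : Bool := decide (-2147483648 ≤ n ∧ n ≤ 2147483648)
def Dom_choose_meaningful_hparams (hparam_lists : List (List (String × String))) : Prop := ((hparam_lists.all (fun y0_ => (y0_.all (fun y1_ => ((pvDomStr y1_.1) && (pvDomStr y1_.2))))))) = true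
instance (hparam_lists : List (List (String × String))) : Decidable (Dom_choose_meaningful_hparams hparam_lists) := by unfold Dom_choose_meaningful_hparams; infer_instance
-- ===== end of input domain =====

-- B inverts A's loop nesting: instead of one grouping pass building a keys_to_values dict,
-- B iterates the key set and rescans hparam_lists per key, collecting that key's distinct values.

-- ===== PORT A =====
-- A's inner statement: `if v not in keys_to_values[k]: keys_to_values[k].append(v)`
def pvStepA (d : PySem.Dict String (List String)) (kv : String × String) : PySem.Dict String (List String) :=
  if (d.getD kv.1 []).contains kv.2 then d else d.insert kv.1 (d.getD kv.1 [] ++ [kv.2])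

def choose_meaningful_hparams (hparam_lists : List (List (String × String))) : List String :=
  let all_keys : PySem.Set String :=
    hparam_lists.foldl (fun s hparams => PySem.Set.update s (hparams.map Prod.fst)) PySem.Set.empty
  let keys_to_values0 : PySem.Dict String (List String) :=
    all_keys.foldl (fun d k => d.insert k ([] : List String)) PySem.Dict.empty
  let keys_to_values :=
    hparam_lists.foldl (fun d hparams => hparams.foldl pvStepA d) keys_to_values0
  keys_to_values.items.foldl (fun acc kv => if kv.2.length > 1 then acc ++ [kv.1] else acc) []

-- ===== PORT B =====
-- B's inner statement: `if k in hparams and hparams[k] not in seen: seen.append(hparams[k])`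
def pvScanB (k : String) (seen : List String) (hparams : List (String × String)) : List String :=
  match (PySem.Dict.mk hparams).get? k with
  | some v => if seen.contains v then seen else seen ++ [v]
  | none => seen

def choose_meaningful_hparams_alt (hparam_lists : List (List (String × String))) : List String :=
  let all_keys : PySem.Set String :=
    hparam_lists.foldl (fun s hparams => PySem.Set.update s (hparams.map Prod.fst)) PySem.Set.empty
  all_keys.foldl (fun acc k =>
    let seen := hparam_lists.foldl (pvScanB k) []
    if seen.length > 1 then acc ++ [k] else acc) []

-- ===== PRECONDITION & SPEC =====
-- The inner lists encode Python dicts, which cannot hold two entries with the same key: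
-- Pre_ requires distinct keys within each inner association list (it excludes no input the Python accepts).
def Pre_choose_meaningful_hparams (hparam_lists : List (List (String × String))) : Prop :=
  ∀ hparams ∈ hparam_lists, (hparams.map Prod.fst).Nodup
instance (hparam_lists : List (List (String × String))) : Decidable (Pre_choose_meaningful_hparams hparam_lists) := by unfold Pre_choose_meaningful_hparams; infer_instance

def pvWitness_choose_meaningful_hparams : (List (List (String × String))) :=
  [[("lr", "0.1"), ("seed", "0")], [("lr", "0.2"), ("seed", "0")]]

def Spec_choose_meaningful_hparams (hparam_lists : List (List (String × String))) (out : List String) : Prop := out = choose_meaningful_hparams_alt hparam_lists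
instance (hparam_lists : List (List (String × String))) (out : List String) : Decidable (Spec_choose_meaningful_hparams hparam_lists out) := by unfold Spec_choose_meaningful_hparams; infer_instance

-- ===== CLAIM (what is proved, stated in full; the proofs are below) =====
def Claim_equal_choose_meaningful_hparams : Prop := ∀ (hparam_lists : List (List (String × String))), Dom_choose_meaningful_hparams hparam_lists → Pre_choose_meaningful_hparams hparam_lists → Spec_choose_meaningful_hparams hparam_lists (choose_meaningful_hparams hparam_lists)

-- ===== LEMMAS AND PROOFS =====

-- the key set built by both first loops
def pvAllKeys (hparam_lists : List (List (String × String))) : PySem.Set String :=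
  hparam_lists.foldl (fun s hparams => PySem.Set.update s (hparams.map Prod.fst)) PySem.Set.empty

theorem pvAllKeys_nodup_aux (ls : List (List (String × String))) (s : PySem.Set String)
    (hs : s.Nodup) : (ls.foldl (fun s hparams => PySem.Set.update s (hparams.map Prod.fst)) s).Nodup := by
  induction ls generalizing s with
  | nil => exact hs
  | cons h t ih => exact ih _ (PySem.Set.nodup_update _ _ hs)

theorem pvAllKeys_nodup (ls : List (List (String × String))) : (pvAllKeys ls).Nodup :=
  pvAllKeys_nodup_aux ls _ List.nodup_nil

theorem pvAllKeys_mem_aux (ls : List (List (String × String))) (s : PySem.Set String) (k : String) :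
    k ∈ ls.foldl (fun s hparams => PySem.Set.update s (hparams.map Prod.fst)) s ↔
      k ∈ s ∨ ∃ h ∈ ls, k ∈ h.map Prod.fst := by
  induction ls generalizing s with
  | nil => simp
  | cons h t ih =>
    simp only [List.foldl_cons, ih, PySem.Set.mem_update, List.mem_cons]
    constructor
    · rintro ((hk | hk) | ⟨g, hg, hk⟩)
      · exact Or.inl hk
      · exact Or.inr ⟨h, Or.inl rfl, hk⟩
      · exact Or.inr ⟨g, Or.inr hg, hk⟩
    · rintro (hk | ⟨g, (rfl | hg), hk⟩)
      · exact Or.inl (Or.inl hk)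
      · exact Or.inl (Or.inr hk)
      · exact Or.inr ⟨g, hg, hk⟩

-- the initialisation {k: [] for k in all_keys}
theorem pvInit_getD (ks : List String) (d : PySem.Dict String (List String)) (k : String)
    (hd : d.getD k [] = []) :
    (ks.foldl (fun d k => d.insert k ([] : List String)) d).getD k [] = [] := by
  induction ks generalizing d with
  | nil => exact hd
  | cons a t ih =>
    refine ih _ ?_
    rw [PySem.Dict.getD_insert]
    split <;> simp [hd]

theorem pvInit_keys (ks : List String) (hks : ks.Nodup) :
    (ks.foldl (fun d k => d.insert k ([] : List String)) PySem.Dict.empty).keys = ks := by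
  have h1 : (ks.foldl (fun d k => d.insert k ([] : List String)) PySem.Dict.empty).keys =
      PySem.Set.update (PySem.Dict.empty : PySem.Dict String (List String)).keys ks :=
    PySem.Dict.keys_foldl_insert ks _ _
  rw [h1]
  show PySem.Set.update PySem.Set.empty ks = ks
  rw [PySem.Set.update_empty, PySem.Set.ofList_eq_self_of_nodup ks hks]

-- the fill loop leaves keys unchanged when every key it touches is already present
theorem pvFill_keys_inner (h : List (String × String)) (d : PySem.Dict String (List String))
    (hmem : ∀ kv ∈ h, kv.1 ∈ d.keys) : (h.foldl pvStepA d).keys = d.keys := by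
  induction h generalizing d with
  | nil => rfl
  | cons kv t ih =>
    have hk : kv.1 ∈ d.keys := hmem kv (List.mem_cons_self)
    have hstep : (pvStepA d kv).keys = d.keys := by
      unfold pvStepA
      split
      · rfl
      · exact PySem.Dict.keys_insert_of_contains _ _
          ((PySem.Dict.contains_iff_mem_keys _ _).mpr hk)
    rw [List.foldl_cons, ih _ (fun p hp => by rw [hstep]; exact hmem p (List.mem_cons_of_mem _ hp)), hstep]

theorem pvFill_keys_outer (ls : List (List (String × String))) (d : PySem.Dict String (List String))
    (hmem : ∀ h ∈ ls, ∀ kv ∈ h, kv.1 ∈ d.keys) :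
    (ls.foldl (fun d hparams => hparams.foldl pvStepA d) d).keys = d.keys := by
  induction ls generalizing d with
  | nil => rfl
  | cons h t ih =>
    have h1 : (h.foldl pvStepA d).keys = d.keys :=
      pvFill_keys_inner h d (hmem h (List.mem_cons_self))
    rw [List.foldl_cons, ih _ (fun g hg kv hkv => by rw [h1]; exact hmem g (List.mem_cons_of_mem _ hg) kv hkv), h1]

-- a fold over pairs whose keys all differ from k does not change the value at k
theorem pvFill_getD_untouched (t : List (String × String)) (d : PySem.Dict String (List String))
    (k : String) (hk : k ∉ t.map Prod.fst) : (t.foldl pvStepA d).getD k [] = d.getD k [] := by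
  induction t generalizing d with
  | nil => rfl
  | cons kv t ih =>
    simp only [List.map_cons, List.mem_cons, not_or] at hk
    rw [List.foldl_cons, ih _ hk.2]
    unfold pvStepA
    split
    · rfl
    · exact PySem.Dict.getD_insert_of_ne _ _ _ hk.1

-- one dict's pass in A updates the value at k exactly as B's single lookup step does
theorem pvFill_getD_inner (h : List (String × String)) (d : PySem.Dict String (List String))
    (k : String) (hnd : (h.map Prod.fst).Nodup) :
    (h.foldl pvStepA d).getD k [] = pvScanB k (d.getD k []) h := by
  induction h generalizing d with
  | nil => rfl
  | cons kv t ih =>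
    obtain ⟨k', v⟩ := kv
    simp only [List.map_cons, List.nodup_cons] at hnd
    rw [List.foldl_cons]
    by_cases hkk : k' = k
    · subst hkk
      have hget : (PySem.Dict.mk ((k', v) :: t)).get? k' = some v := by
        rw [PySem.Dict.get?_mk_cons]; simp
      rw [pvFill_getD_untouched t _ k' hnd.1]
      simp only [pvScanB, hget]
      unfold pvStepA
      by_cases hm : v ∈ d.getD k' []
      · simp [hm]
      · simp [hm, PySem.Dict.getD_insert_self]
    · have hget : (PySem.Dict.mk ((k', v) :: t)).get? k = (PySem.Dict.mk t).get? k := by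
        rw [PySem.Dict.get?_mk_cons]
        simp [beq_false_of_ne hkk]
      have hstep : (pvStepA d (k', v)).getD k [] = d.getD k [] := by
        unfold pvStepA
        split
        · rfl
        · exact PySem.Dict.getD_insert_of_ne _ _ _ (Ne.symm hkk)
      rw [ih _ hnd.2, hstep]
      simp only [pvScanB, hget]

-- the whole fill loop at key k computes B's per-key scan
theorem pvFill_getD_outer (ls : List (List (String × String))) (d : PySem.Dict String (List String))
    (k : String) (hnd : ∀ h ∈ ls, (h.map Prod.fst).Nodup) :
    (ls.foldl (fun d hparams => hparams.foldl pvStepA d) d).getD k [] =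
      ls.foldl (pvScanB k) (d.getD k []) := by
  induction ls generalizing d with
  | nil => rfl
  | cons h t ih =>
    rw [List.foldl_cons, List.foldl_cons, ih _ (fun g hg => hnd g (List.mem_cons_of_mem _ hg)),
      pvFill_getD_inner h d k (hnd h List.mem_cons_self)]

-- ===== VERDICT (by name: the statement is the Claim_ definition above) =====
theorem choose_meaningful_hparams_spec : Claim_equal_choose_meaningful_hparams := by
  intro ls _ hpre
  unfold Spec_choose_meaningful_hparams choose_meaningful_hparams choose_meaningful_hparams_alt
  set ks := ls.foldl (fun s hparams => PySem.Set.update s (hparams.map Prod.fst)) PySem.Set.empty with hks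
  have hksnd : ks.Nodup := pvAllKeys_nodup ls
  set d0 := ks.foldl (fun d k => d.insert k ([] : List String)) PySem.Dict.empty with hd0
  have hd0keys : d0.keys = ks := pvInit_keys ks hksnd
  set fill := ls.foldl (fun d hparams => hparams.foldl pvStepA d) d0 with hfill
  have hfkeys : fill.keys = ks := by
    rw [hfill, pvFill_keys_outer ls d0 ?_, hd0keys]
    intro h hh kv hkv
    rw [hd0keys, hks, pvAllKeys_mem_aux]
    exact Or.inr ⟨h, hh, List.mem_map_of_mem hkv⟩
  have hfnd : fill.keys.Nodup := by rw [hfkeys]; exact hksnd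
  have hitems : fill.items = fill.keys.map (fun k => (k, fill.getD k [])) :=
    PySem.Dict.items_eq_map_keys fill hfnd []
  have hval : ∀ k, fill.getD k [] = ls.foldl (pvScanB k) [] := by
    intro k
    rw [hfill, pvFill_getD_outer ls d0 k hpre, pvInit_getD ks PySem.Dict.empty k (by rfl)]
  have main : fill.items.foldl (fun acc kv => if kv.2.length > 1 then acc ++ [kv.1] else acc) [] =
      ks.foldl (fun acc k =>
        if (ls.foldl (pvScanB k) []).length > 1 then acc ++ [k] else acc) [] := by
    rw [hitems, hfkeys, List.foldl_map]
    refine PySem.List.foldl_congr_mem ks _ _ [] ?_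
    intro acc k _
    simp only [hval k]
  exact main
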